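-- pv_equiv track=rewrite | github.com/Urbani-Ludovico/University-Prog1 | RussoExam/esame_groppi.py | compute_daily_max_difference
-- ===== SOURCE A (Python) =====
-- class ExamException(Exception):
--     pass
--
-- def compute_daily_max_difference(lista):
--     if not isinstance(lista, list):
--         raise ExamException('{} non è una lista'.format(lista))
--     if len(lista) == 0:
--         return []
--     temp_data=[lista[0]]
--     ris=[]
--     for line in range(1,len(lista)):
--         if int(temp_data[0][0]/86400)==int(lista[line][0]/86400):
--         # controlliamo se i dati presi prima sono della stessa giornata di quelli in esame
--             temp_data.append(lista[line])
--         else: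
--             if len(temp_data)==1:
--                 ris.append(None)
--             else:
--                 massimo=temp_data[0][1] # assumiamo il primo valore come massimo e minimo
--                 minimo=temp_data[0][1]
--                 for dato in temp_data:
--                     if dato[1]>massimo:
--                         massimo=dato[1]
--                     if dato[1]<minimo:
--                         minimo=dato[1]
--                 ris.append(massimo-minimo)
--             temp_data=[lista[line]]
--             # alla fine modifichiamo la temp_data e ci mettiamo solo la lista[line]
--     # alla fine del ciclo calcolo l'ultima giornata
--     if len(temp_data)==1:
--         ris.append(None)
--     else:
--         massimo=temp_data[0][1] # assumiamo il primo valore come massimo e minimo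
--         minimo=temp_data[0][1]
--         for dato in temp_data:
--             if dato[1]>massimo:
--                 massimo=dato[1]
--             if dato[1]<minimo:
--                 minimo=dato[1]
--         ris.append(massimo-minimo)
--     return ris
-- ===== SOURCE B (Python) =====
-- class ExamException(Exception):
--     pass
--
-- def compute_daily_max_difference(lista):
--     if not isinstance(lista, list):
--         raise ExamException('{} non è una lista'.format(lista))
--     n = len(lista)
--     keys = [int(x[0] / 86400) for x in lista]
--     starts = [i for i in range(n) if i == 0 or keys[i] != keys[i - 1]]
--     ends = starts[1:] + [n]
--     ris = []
--     for s, e in zip(starts, ends):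
--         if e - s == 1:
--             ris.append(None)
--         else:
--             vals = [v for _, v in lista[s:e]]
--             ris.append(max(vals) - min(vals))
--     return ris
-- ===== Notes on version B (the rewrite author's own statement) =====
-- stated objective: alternative
-- what changed: Replaces A's streaming buffer-and-flush loop (temp_data accumulator with duplicated flush code and hand-rolled max/min tracking) by staged passes: precompute the day-key list, collect group-start indices by comparing adjacent keys, then slice each [start,end) run and take max-min of its values.
import Mathlib
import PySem

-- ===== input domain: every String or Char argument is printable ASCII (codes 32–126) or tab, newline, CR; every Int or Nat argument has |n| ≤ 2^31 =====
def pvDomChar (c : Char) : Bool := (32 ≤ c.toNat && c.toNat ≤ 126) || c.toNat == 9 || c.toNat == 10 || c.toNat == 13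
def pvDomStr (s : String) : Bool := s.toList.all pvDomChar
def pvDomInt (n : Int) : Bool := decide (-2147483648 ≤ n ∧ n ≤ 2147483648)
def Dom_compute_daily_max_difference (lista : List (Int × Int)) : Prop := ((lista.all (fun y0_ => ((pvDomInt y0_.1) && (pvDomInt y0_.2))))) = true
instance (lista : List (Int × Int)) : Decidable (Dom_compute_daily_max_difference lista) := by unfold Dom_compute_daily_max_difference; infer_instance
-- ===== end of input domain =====

-- B replaces A's streaming buffer-and-flush loop by staged passes: precompute the day-key list,
-- collect the group-start indices by comparing adjacent keys, then slice each [start, end) run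
-- and take max-min of its values (alternative decomposition; same O(n) cost).
-- `int(x[0]/86400)` is float division truncated toward zero; for |x| ≤ 2^31 this equals exact
-- truncated division, so both ports use Int.tdiv 86400 (exact on the stated domain).

-- ===== PORT A =====
-- the duplicated flush code of A (len==1 -> None, else one pass tracking massimo/minimo)
def pvFlushA (temp : List (Int × Int)) : Option Int :=
  if temp.length == 1 then none
  else
    let m0 := (temp.headD (0, 0)).2
    let mm := temp.foldl
      (fun (p : Int × Int) d =>
        (if d.2 > p.1 then d.2 else p.1, if d.2 < p.2 then d.2 else p.2)) (m0, m0)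
    some (mm.1 - mm.2)

def compute_daily_max_difference (lista : List (Int × Int)) : List (Option Int) :=
  match lista with
  | [] => []
  | h :: rest =>
    let st := rest.foldl
      (fun (s : List (Int × Int) × List (Option Int)) line =>
        if ((s.1.headD (0, 0)).1.tdiv 86400) == (line.1.tdiv 86400)
        then (s.1 ++ [line], s.2)
        else ([line], s.2 ++ [pvFlushA s.1])) ([h], [])
    st.2 ++ [pvFlushA st.1]

-- ===== PORT B =====
-- keys = [int(x[0]/86400) for x in lista]
-- starts = [i for i in range(n) if i == 0 or keys[i] != keys[i-1]]   (keys[i-1] never read at i==0: `or` short-circuits)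
-- ends = starts[1:] + [n]; per run [s:e): None if e-s==1 else max(vals)-min(vals) (max/min = running folds)
def compute_daily_max_difference_alt (lista : List (Int × Int)) : List (Option Int) :=
  let n : Int := PySem.List.len lista
  let keys : List Int := lista.map (fun x => x.1.tdiv 86400)
  let starts : List Int := (PySem.List.pyRange 0 n 1).filter
    (fun i => i == 0 || !(PySem.List.pyGetD keys i 0 == PySem.List.pyGetD keys (i - 1) 0))
  let ends : List Int := starts.drop 1 ++ [n]
  (starts.zip ends).map (fun (se : Int × Int) =>
    if se.2 - se.1 == 1 then none
    else
      match (PySem.List.slice lista (some se.1) (some se.2)).map Prod.snd with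
      | [] => none   -- unreachable totality guard: every run is nonempty, Python's max never sees []
      | d :: t => some (t.foldl max d - t.foldl min d))

-- ===== PRECONDITION & SPEC =====
def Spec_compute_daily_max_difference (lista : List (Int × Int)) (out : List (Option Int)) : Prop := out = compute_daily_max_difference_alt lista
instance (lista : List (Int × Int)) (out : List (Option Int)) : Decidable (Spec_compute_daily_max_difference lista out) := by unfold Spec_compute_daily_max_difference; infer_instance

-- ===== CLAIM (what is proved, stated in full; the proofs are below) =====
def Claim_equal_compute_daily_max_difference : Prop := ∀ (lista : List (Int × Int)), Dom_compute_daily_max_difference lista → Spec_compute_daily_max_difference lista (compute_daily_max_difference lista)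

-- ===== LEMMAS AND PROOFS =====

-- day key shared by the proof-side helpers
def pvKey (x : Int × Int) : Int := x.1.tdiv 86400

-- consecutive same-key runs (the common grouping both programs compute)
def pvGroups (lista : List (Int × Int)) : List (List (Int × Int)) :=
  match lista with
  | [] => []
  | h :: t =>
    (h :: t.takeWhile (fun x => pvKey x == pvKey h)) ::
      pvGroups (t.dropWhile (fun x => pvKey x == pvKey h))
termination_by lista.length
decreasing_by
  have := List.length_dropWhile_le (fun x : Int × Int => pvKey x == pvKey h) t
  simp; omega

-- one group: len 1 -> None, else max - min of the values
def pvSumm (g : List (Int × Int)) : Option Int :=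
  match g with
  | [] => none
  | [_] => none
  | d :: t => some ((t.map Prod.snd).foldl max d.2 - (t.map Prod.snd).foldl min d.2)

theorem pvFold_pair (l : List (Int × Int)) (a b : Int) :
    l.foldl (fun (p : Int × Int) d =>
        (if d.2 > p.1 then d.2 else p.1, if d.2 < p.2 then d.2 else p.2)) (a, b)
      = ((l.map Prod.snd).foldl max a, (l.map Prod.snd).foldl min b) := by
  have h1 : ∀ a b : Int, (if b > a then b else a) = max a b := fun a b => by
    simp [max_def]; split_ifs <;> omega
  have h2 : ∀ a b : Int, (if b < a then b else a) = min a b := fun a b => by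
    simp [min_def]; split_ifs <;> omega
  induction l generalizing a b with
  | nil => simp
  | cons x t ih =>
      rw [List.foldl_cons, ih]
      simp only [List.map_cons, List.foldl_cons, h1, h2]

theorem pvFlush_eq_summ (g : List (Int × Int)) (hg : g ≠ []) : pvFlushA g = pvSumm g := by
  match g with
  | [d] => simp [pvFlushA, pvSumm]
  | d :: x :: t =>
      simp only [pvFlushA, pvSumm, List.length_cons]
      rw [if_neg (by simp)]
      have e1 : (if d.2 < x.2 then x.2 else d.2) = max d.2 x.2 := by
        simp [max_def]; split_ifs <;> omega
      have e2 : (if x.2 < d.2 then x.2 else d.2) = min d.2 x.2 := by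
        simp [min_def]; split_ifs <;> omega
      simp [pvFold_pair, List.foldl_cons, e1, e2]

theorem pvMain (t : List (Int × Int)) : ∀ (temp : List (Int × Int)) (ris : List (Option Int)),
    temp ≠ [] →
    (∀ x ∈ temp, x.1.tdiv 86400 = (temp.headD (0, 0)).1.tdiv 86400) →
    ((t.foldl
        (fun (s : List (Int × Int) × List (Option Int)) line =>
          if ((s.1.headD (0, 0)).1.tdiv 86400) == (line.1.tdiv 86400)
          then (s.1 ++ [line], s.2)
          else ([line], s.2 ++ [pvFlushA s.1])) (temp, ris)).2 ++ [pvFlushA (t.foldl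
        (fun (s : List (Int × Int) × List (Option Int)) line =>
          if ((s.1.headD (0, 0)).1.tdiv 86400) == (line.1.tdiv 86400)
          then (s.1 ++ [line], s.2)
          else ([line], s.2 ++ [pvFlushA s.1])) (temp, ris)).1])
      = ris ++ pvSumm (temp ++ t.takeWhile (fun x => x.1.tdiv 86400 == (temp.headD (0, 0)).1.tdiv 86400)) ::
          (pvGroups (t.dropWhile (fun x => x.1.tdiv 86400 == (temp.headD (0, 0)).1.tdiv 86400))).map pvSumm := by
  induction t with
  | nil =>
      intro temp ris hne _
      simp [pvGroups, pvFlush_eq_summ temp hne]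
  | cons x t ih =>
      intro temp ris hne hinv
      by_cases hk : (temp.headD (0, 0)).1.tdiv 86400 = x.1.tdiv 86400
      · have hc : ((temp.headD (0, 0)).1.tdiv 86400 == x.1.tdiv 86400) = true := beq_iff_eq.mpr hk
        simp only [List.foldl_cons]
        rw [if_pos hc]
        have hhd : ((temp ++ [x]).headD (0, 0)) = temp.headD (0, 0) := by
          cases temp with
          | nil => exact absurd rfl hne
          | cons a b => simp
        have := ih (temp ++ [x]) ris (by simp)
          (by intro y hy; rw [hhd]
              rcases (List.mem_append.mp hy) with h | h
              · exact hinv y h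
              · simp at h; subst h; exact hk.symm)
        rw [this, hhd,
            List.takeWhile_cons_of_pos (by simp only [beq_iff_eq]; exact hk.symm),
            List.dropWhile_cons_of_pos (by simp only [beq_iff_eq]; exact hk.symm)]
        simp
      · have hc : ¬ (((temp.headD (0, 0)).1.tdiv 86400 == x.1.tdiv 86400) = true) :=
          fun hb => hk (beq_iff_eq.mp hb)
        simp only [List.foldl_cons]
        rw [if_neg hc]
        have := ih [x] (ris ++ [pvFlushA temp]) (by simp) (by simp)
        rw [this]
        simp only [List.headD_cons]
        rw [List.takeWhile_cons_of_neg (by simp only [beq_iff_eq]; exact fun h => hk h.symm),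
            List.dropWhile_cons_of_neg (by simp only [beq_iff_eq]; exact fun h => hk h.symm)]
        rw [pvFlush_eq_summ temp hne]
        rw [pvGroups]
        simp [pvKey]

-- A computes the per-group summaries
theorem pvA_eq_groups (lista : List (Int × Int)) :
    compute_daily_max_difference lista = (pvGroups lista).map pvSumm := by
  cases lista with
  | nil => simp [compute_daily_max_difference, pvGroups]
  | cons h rest =>
      have := pvMain rest [h] [] (by simp) (by simp)
      simp only [List.headD_cons] at this
      simp only [compute_daily_max_difference]
      rw [pvGroups]
      simp only [pvKey]
      simpa using this

-- ===== B side: Nat-level model of the staged-pass program =====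
def pvPN (K : List Int) (i : Nat) : Bool := (i == 0) || !(K.getD i 0 == K.getD (i - 1) 0)

def pvSN (K : List Int) : List Nat := (List.range K.length).filter (pvPN K)

def pvBody (l : List (Int × Int)) (se : Nat × Nat) : Option Int :=
  if se.2 - se.1 == 1 then none
  else
    match ((l.drop se.1).take (se.2 - se.1)).map Prod.snd with
    | [] => none
    | d :: t => some (t.foldl max d - t.foldl min d)

def pvAltN (l : List (Int × Int)) : List (Option Int) :=
  ((pvSN (l.map pvKey)).zip ((pvSN (l.map pvKey)).drop 1 ++ [l.length])).map (pvBody l)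

-- the Int-indexed port computes the Nat-level model
theorem pvAlt_eq_altN (l : List (Int × Int)) :
    compute_daily_max_difference_alt l = pvAltN l := by
  unfold compute_daily_max_difference_alt pvAltN
  simp only [PySem.List.len_eq]
  have hK : l.map (fun x => x.1.tdiv 86400) = l.map pvKey := rfl
  rw [hK]
  set K := l.map pvKey with hKdef
  have hlen : K.length = l.length := by simp [hKdef]
  have hstarts : (PySem.List.pyRange 0 (l.length : Int) 1).filter
      (fun i => i == 0 || !(PySem.List.pyGetD K i 0 == PySem.List.pyGetD K (i - 1) 0))
      = (pvSN K).map (fun k : Nat => (k : Int)) := by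
    rw [PySem.List.pyRange_one]
    have h0 : ((l.length : Int) - 0).toNat = K.length := by omega
    rw [h0]
    rw [List.filter_map]
    unfold pvSN
    congr 1
    · funext k; simp
    apply List.filter_congr
    intro k hk
    simp only [List.mem_range] at hk
    cases k with
    | zero => simp [pvPN]
    | succ j =>
        have e1 : ((0 : Int) + ((j + 1 : Nat) : Int)) = ((j + 1 : Nat) : Int) := by push_cast; ring
        have e2 : (((j + 1 : Nat) : Int)) - 1 = ((j : Nat) : Int) := by push_cast; ring
        simp only [Function.comp, e1, e2, PySem.List.pyGetD_natCast, pvPN]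
        simp
        intro h
        exact absurd h (by omega)
  rw [hstarts]
  rw [← List.map_drop, ← hlen]
  have hsing : ([(K.length : Int)]) = ([K.length].map (fun k : Nat => (k : Int))) := by simp [hlen]
  rw [hsing, ← List.map_append, List.zip_map, List.map_map]
  apply List.map_congr_left
  intro se _
  obtain ⟨s, e⟩ := se
  simp only [Function.comp, Prod.map, pvBody]
  by_cases hse : s ≤ e
  · have hc : (((e : Int) - (s : Int)) == 1) = (((e - s : Nat) == 1)) := by
      have : ((e : Int) - (s : Int)) = ((e - s : Nat) : Int) := by omega
      rw [this]; simp
    rw [PySem.List.slice_natCast, hc]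
  · have hc1 : (((e : Int) - (s : Int)) == 1) = false := by
      simp only [beq_eq_false_iff_ne, ne_eq]; omega
    have hc2 : (((e - s : Nat)) == 1) = false := by
      simp only [beq_eq_false_iff_ne, ne_eq]; omega
    rw [PySem.List.slice_natCast, hc1, hc2]

-- start-index decomposition at a key change
theorem pvSN_append (K1 K2 : List Int) (k : Int) (hne : K1 ≠ [])
    (hall : ∀ x ∈ K1, x = k) (hhd : ∀ y ∈ K2.head?, y ≠ k) :
    pvSN (K1 ++ K2) = 0 :: (pvSN K2).map (· + K1.length) := by
  have hK1 : ∀ i, i < K1.length → (K1 ++ K2).getD i 0 = k := by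
    intro i hi
    rw [List.getD_append _ _ _ _ hi, List.getD_eq_getElem _ _ hi]
    exact hall _ (List.getElem_mem hi)
  have hL : 0 < K1.length := List.length_pos_iff.mpr hne
  unfold pvSN
  rw [List.length_append, List.range_add, List.filter_append]
  have part1 : (List.range K1.length).filter (pvPN (K1 ++ K2)) = [0] := by
    have hcong : ∀ i ∈ List.range K1.length, pvPN (K1 ++ K2) i = (fun i : Nat => i == 0) i := by
      intro i hi
      simp only [List.mem_range] at hi
      cases i with
      | zero => unfold pvPN; simp
      | succ j =>
          have h1 : (K1 ++ K2).getD (j + 1) 0 = k := hK1 _ hi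
          have h2 : (K1 ++ K2).getD (j + 1 - 1) 0 = k := hK1 _ (by omega)
          unfold pvPN
          rw [h1, h2]
          simp
    rw [List.filter_congr hcong]
    obtain ⟨Lp, hLp⟩ : ∃ Lp, K1.length = Lp + 1 := ⟨K1.length - 1, by omega⟩
    rw [hLp, List.range_succ_eq_map, List.filter_cons_of_pos (by simp), List.filter_map]
    have hnil : (List.range Lp).filter ((fun i : Nat => i == 0) ∘ Nat.succ) = [] := by
      apply List.filter_eq_nil_iff.mpr
      intro j _; simp [Function.comp]
    rw [hnil]; simp
  have part2 : ((List.range K2.length).map (K1.length + ·)).filter (pvPN (K1 ++ K2))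
      = ((List.range K2.length).filter (pvPN K2)).map (· + K1.length) := by
    rw [List.filter_map]
    have hc : ∀ j ∈ List.range K2.length,
        (pvPN (K1 ++ K2) ∘ (K1.length + ·)) j = pvPN K2 j := by
      intro j hj
      simp only [List.mem_range] at hj
      cases j with
      | zero =>
          obtain ⟨y, K2', rfl⟩ : ∃ y K2', K2 = y :: K2' := by
            cases K2 with
            | nil => simp at hj
            | cons y K2' => exact ⟨y, K2', rfl⟩
          have h1 : (K1 ++ y :: K2').getD (K1.length + 0) 0 = y := by
            rw [List.getD_append_right _ _ _ _ (by omega)]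
            simp
          have h2 : (K1 ++ y :: K2').getD (K1.length + 0 - 1) 0 = k := hK1 _ (by omega)
          have hy : y ≠ k := hhd y (by simp)
          show pvPN (K1 ++ y :: K2') (K1.length + 0) = pvPN (y :: K2') 0
          unfold pvPN
          rw [h1, h2]
          simp [hy]
      | succ j =>
          have h1 : (K1 ++ K2).getD (K1.length + (j + 1)) 0 = K2.getD (j + 1) 0 := by
            rw [List.getD_append_right _ _ _ _ (by omega)]
            congr 1; omega
          have h2 : (K1 ++ K2).getD (K1.length + (j + 1) - 1) 0 = K2.getD j 0 := by
            rw [List.getD_append_right _ _ _ _ (by omega)]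
            congr 1; omega
          show pvPN (K1 ++ K2) (K1.length + (j + 1)) = pvPN K2 (j + 1)
          unfold pvPN
          rw [h1, h2]
          simp
    rw [List.filter_congr hc]
    apply List.map_congr_left
    intro j _; omega
  rw [part1, part2]
  rfl

-- the start list of a nonempty key list begins with 0
theorem pvSN_cons (K : List Int) (h : K ≠ []) : ∃ s', pvSN K = 0 :: s' := by
  obtain ⟨m, hm⟩ : ∃ m, K.length = m + 1 :=
    ⟨K.length - 1, by have := List.length_pos_iff.mpr h; omega⟩
  unfold pvSN
  rw [hm, List.range_succ_eq_map, List.filter_cons_of_pos (by unfold pvPN; simp)]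
  exact ⟨_, rfl⟩

-- head of dropWhile fails the predicate
theorem pvHead_dropWhile {α : Type} (p : α → Bool) (l : List α) :
    ∀ y ∈ (l.dropWhile p).head?, p y = false := by
  induction l with
  | nil => simp
  | cons a t ih =>
      intro y hy
      by_cases hp : p a = true
      · rw [List.dropWhile_cons_of_pos hp] at hy
        exact ih y hy
      · rw [List.dropWhile_cons_of_neg hp] at hy
        simp at hy
        subst hy
        simpa using hp

-- the run [0, g.length) of g ++ rest summarizes to pvSumm g
theorem pvBody_group (h : Int × Int) (gt rest : List (Int × Int)) :
    pvBody ((h :: gt) ++ rest) (0, (h :: gt).length) = pvSumm (h :: gt) := by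
  have htake : ((h :: gt) ++ rest).take ((h :: gt).length) = h :: gt := List.take_left
  cases gt with
  | nil => simp [pvBody, pvSumm]
  | cons x ts =>
      unfold pvBody pvSumm
      simp only [List.drop_zero, Nat.sub_zero, htake]
      rw [if_neg (by simp)]
      simp

-- shifting a run past the first group
theorem pvBody_shift (g rest : List (Int × Int)) (se : Nat × Nat) :
    pvBody (g ++ rest) (se.1 + g.length, se.2 + g.length) = pvBody rest se := by
  obtain ⟨s, e⟩ := se
  unfold pvBody
  have h1 : (e + g.length) - (s + g.length) = e - s := by omega
  have h2 : (g ++ rest).drop (s + g.length) = rest.drop s := by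
    rw [Nat.add_comm, ← List.drop_drop, List.drop_left]
  simp only [h1, h2]

-- one group peels off the front of the model's output
theorem pvAltN_append (h : Int × Int) (gt rest : List (Int × Int))
    (hall : ∀ x ∈ gt, pvKey x = pvKey h)
    (hhd : ∀ r ∈ rest.head?, pvKey r ≠ pvKey h) :
    pvAltN ((h :: gt) ++ rest) = pvSumm (h :: gt) :: pvAltN rest := by
  unfold pvAltN
  have hSapp := pvSN_append ((h :: gt).map pvKey) (rest.map pvKey) (pvKey h) (by simp)
    (by intro x hx
        simp only [List.map_cons, List.mem_cons, List.mem_map] at hx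
        rcases hx with rfl | ⟨y, hy, rfl⟩
        · rfl
        · exact hall y hy)
    (by intro y hy
        rw [List.head?_map] at hy
        simp only [Option.mem_def, Option.map_eq_some_iff] at hy
        obtain ⟨r, hr, rfl⟩ := hy
        exact hhd r hr)
  rw [← List.map_append] at hSapp
  rw [hSapp]
  have hL : ((h :: gt).map pvKey).length = gt.length + 1 := by simp
  have hlen : ((h :: gt) ++ rest).length = (gt.length + 1) + rest.length := by
    simp [Nat.add_comm, Nat.add_assoc, Nat.add_left_comm]
  rw [hL, hlen]
  rcases Decidable.em (rest = []) with hre | hre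
  · subst hre
    have hsn : pvSN (([] : List (Int × Int)).map pvKey) = [] := rfl
    rw [hsn]
    simp only [List.map_nil, List.drop_one, List.tail_cons, List.nil_append,
      List.zip_cons_cons, List.zip_nil_right, List.map_cons, List.map_nil,
      List.zip_nil_left, List.append_nil]
    have hb := pvBody_group h gt []
    simp only [List.append_nil, List.length_cons, List.length_nil, Nat.add_zero] at hb ⊢
    rw [hb]
  · obtain ⟨s2, hs2⟩ := pvSN_cons (rest.map pvKey) (by simpa using hre)
    rw [hs2]
    simp only [List.map_cons, Nat.zero_add, List.drop_one, List.tail_cons]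
    have hzip2 : ((gt.length + 1) :: s2.map (· + (gt.length + 1))).zip
          ((s2.map (· + (gt.length + 1))) ++ [gt.length + 1 + rest.length])
        = ((0 :: s2).zip (s2 ++ [rest.length])).map
            (Prod.map (· + (gt.length + 1)) (· + (gt.length + 1))) := by
      have e1 : ((gt.length + 1) :: s2.map (· + (gt.length + 1)))
          = (0 :: s2).map (· + (gt.length + 1)) := by simp
      have e2 : ((s2.map (· + (gt.length + 1))) ++ [gt.length + 1 + rest.length])
          = (s2 ++ [rest.length]).map (· + (gt.length + 1)) := by
        simp [Nat.add_comm]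
      rw [e1, e2, List.zip_map]
    rw [List.cons_append, List.cons_append, List.zip_cons_cons, List.map_cons, hzip2, List.map_map]
    congr 1
    · exact pvBody_group h gt rest
    apply List.map_congr_left
    intro se _
    obtain ⟨a, b⟩ := se
    have := pvBody_shift (h :: gt) rest (a, b)
    simp only [List.length_cons] at this
    simpa using this

-- the model computes the per-group summaries
theorem pvAltN_eq_groups (l : List (Int × Int)) :
    pvAltN l = (pvGroups l).map pvSumm := by
  match l with
  | [] => rw [pvGroups]; rfl
  | h :: t =>
    have IH := pvAltN_eq_groups (t.dropWhile (fun x => pvKey x == pvKey h))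
    have hgl : (h :: t.takeWhile (fun x => pvKey x == pvKey h))
        ++ t.dropWhile (fun x => pvKey x == pvKey h) = h :: t := by simp
    have happ := pvAltN_append h (t.takeWhile (fun x => pvKey x == pvKey h))
      (t.dropWhile (fun x => pvKey x == pvKey h))
      (by intro x hx
          have hb : (pvKey x == pvKey h) = true :=
            List.mem_takeWhile_imp (p := fun x => pvKey x == pvKey h) (l := t) hx
          exact beq_iff_eq.mp hb)
      (by intro r hr hcontra
          have hb : (fun x => pvKey x == pvKey h) r = false :=
            pvHead_dropWhile (fun x => pvKey x == pvKey h) t r hr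
          have hb' : (pvKey r == pvKey h) = false := hb
          rw [hcontra] at hb'
          simp at hb')
    rw [hgl] at happ
    rw [happ, IH, pvGroups, List.map_cons]
termination_by l.length
decreasing_by
  have := List.length_dropWhile_le (fun x : Int × Int => pvKey x == pvKey h) t
  simp; omega

-- ===== VERDICT (by name: the statement is the Claim_ definition above) =====
theorem compute_daily_max_difference_spec : Claim_equal_compute_daily_max_difference := by
  intro lista _
  unfold Spec_compute_daily_max_difference
  rw [pvA_eq_groups, pvAlt_eq_altN, pvAltN_eq_groups]
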